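-- pv_equiv track=rewrite | github.com/OxQuasar/nous-memories | iching/deep/01_assignment_test.py | _palace_root
-- ===== SOURCE A (Python) =====
-- def _palace_root(hex_val):
--     """Find palace root (standard 八宫 system)."""
--     # Palace roots are doubled trigrams
--     for root_trig in range(8):
--         root = root_trig | (root_trig << 3)
--         # Check all 8 ranks
--         masks = [0b000000, 0b000001, 0b000011, 0b000111,
--                  0b001111, 0b011111, 0b010111, 0b010000]
--         for mask in masks:
--             if root ^ mask == hex_val:
--                 return root
--     return hex_val  # fallback
-- ===== SOURCE B (Python) =====
-- _MASKS = [0b000000, 0b000001, 0b000011, 0b000111,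
--           0b001111, 0b011111, 0b010111, 0b010000]
--
-- def _build_table():
--     table = {}
--     for root_trig in range(8):
--         root = root_trig | (root_trig << 3)
--         for mask in _MASKS:
--             table.setdefault(root ^ mask, root)
--     return table
--
-- _TABLE = _build_table()
--
-- def _palace_root(hex_val):
--     return _TABLE.get(hex_val, hex_val)
-- ===== Notes on version B (the rewrite author's own statement) =====
-- stated objective: simpler
-- what changed: B precomputes a hexagram->root lookup table once (setdefault preserving A's outer-root/inner-mask first-match precedence) and replaces A's nested XOR-and-compare scan by a single dict lookup with the input as fallback.
import Mathlib
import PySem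

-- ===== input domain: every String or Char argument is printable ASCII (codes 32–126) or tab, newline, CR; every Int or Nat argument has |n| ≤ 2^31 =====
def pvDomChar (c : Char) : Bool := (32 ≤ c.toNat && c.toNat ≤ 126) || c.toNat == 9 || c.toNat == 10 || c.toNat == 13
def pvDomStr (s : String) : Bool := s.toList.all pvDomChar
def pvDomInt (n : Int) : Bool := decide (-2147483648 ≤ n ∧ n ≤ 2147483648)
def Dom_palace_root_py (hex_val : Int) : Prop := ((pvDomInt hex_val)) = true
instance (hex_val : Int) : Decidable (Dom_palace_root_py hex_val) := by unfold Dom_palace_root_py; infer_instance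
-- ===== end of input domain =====

-- B precomputes a hexagram->root lookup table once (setdefault keeps A's first-match precedence)
-- and replaces A's nested XOR-and-compare scan by a single dict lookup (objective: simpler).

-- ===== PORT A =====
-- the masks list A builds inside the loop (the same literal each iteration)
def pvMasks : List Int := [0, 1, 3, 7, 15, 31, 23, 16]

-- inner loop: 'for mask in masks: if root ^ mask == hex_val: return root'
def pvAInner (hex_val root : Int) : List Int → Option Int
  | [] => none
  | m :: rest => if PySem.Int.bxor root m = hex_val then some root else pvAInner hex_val root rest

-- one iteration of the outer loop body: root = root_trig | (root_trig << 3), then the inner scan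
def pvAStep (hex_val t : Int) : Option Int :=
  pvAInner hex_val (PySem.Int.bor t (t <<< 3)) pvMasks

-- outer loop: 'for root_trig in range(8)' with early return, else the fallback
def pvAOuter (hex_val : Int) : List Int → Option Int
  | [] => none
  | t :: rest =>
    match pvAStep hex_val t with
    | some r => some r
    | none => pvAOuter hex_val rest

def palace_root_py (hex_val : Int) : Int :=
  (pvAOuter hex_val (PySem.List.pyRange 0 8 1)).getD hex_val

-- ===== PORT B =====
-- _MASKS literal of Source B
def pvBMasks : List Int := [0, 1, 3, 7, 15, 31, 23, 16]

-- body of the outer build loop: 'root = ...; for mask in _MASKS: table.setdefault(root ^ mask, root)'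
def pvBStep (tbl : PySem.Dict Int Int) (t : Int) : PySem.Dict Int Int :=
  pvBMasks.foldl
    (fun tbl m => tbl.setdefault (PySem.Int.bxor (PySem.Int.bor t (t <<< 3)) m) (PySem.Int.bor t (t <<< 3)))
    tbl

-- _TABLE = _build_table()
def pvTable : PySem.Dict Int Int :=
  (PySem.List.pyRange 0 8 1).foldl pvBStep PySem.Dict.empty

-- return _TABLE.get(hex_val, hex_val)
def palace_root_py_alt (hex_val : Int) : Int :=
  pvTable.getD hex_val hex_val

-- ===== PRECONDITION & SPEC =====
def Spec_palace_root_py (hex_val : Int) (out : Int) : Prop := out = palace_root_py_alt hex_val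
instance (hex_val : Int) (out : Int) : Decidable (Spec_palace_root_py hex_val out) := by unfold Spec_palace_root_py; infer_instance

-- ===== CLAIM (what is proved, stated in full; the proofs are below) =====
def Claim_equal_palace_root_py : Prop := ∀ (hex_val : Int), Dom_palace_root_py hex_val → Spec_palace_root_py hex_val (palace_root_py hex_val)

-- ===== LEMMAS AND PROOFS =====

-- every candidate value A compares against (and every key B stores) lies in [0, 64)
lemma pv_candidates_bounded : ∀ t ∈ PySem.List.pyRange 0 8 1, ∀ m ∈ pvMasks,
    0 ≤ PySem.Int.bxor (PySem.Int.bor t (t <<< 3)) m ∧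
    PySem.Int.bxor (PySem.Int.bor t (t <<< 3)) m < 64 := by decide

lemma pvAInner_eq_none (hex_val root : Int) (ms : List Int)
    (h : ∀ m ∈ ms, PySem.Int.bxor root m ≠ hex_val) : pvAInner hex_val root ms = none := by
  induction ms with
  | nil => rfl
  | cons m rest ih =>
    simp only [pvAInner, if_neg (h m (by simp))]
    exact ih fun m' hm' => h m' (by simp [hm'])

lemma pvAOuter_eq_none (hex_val : Int) (ts : List Int)
    (h : ∀ t ∈ ts, pvAStep hex_val t = none) : pvAOuter hex_val ts = none := by
  induction ts with
  | nil => rfl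
  | cons t rest ih =>
    simp only [pvAOuter, h t (by simp)]
    exact ih fun t' ht' => h t' (by simp [ht'])

-- the table, computed once and for all
set_option maxRecDepth 20000 in
lemma pvTable_lit : pvTable = PySem.Dict.mk [(0, 0), (1, 0), (3, 0), (7, 0), (15, 0), (31, 0), (23, 0), (16, 0), (9, 9), (8, 9), (10, 9), (14, 9), (6, 9), (22, 9), (30, 9), (25, 9), (18, 18), (19, 18), (17, 18), (21, 18), (29, 18), (13, 18), (5, 18), (2, 18), (27, 27), (26, 27), (24, 27), (28, 27), (20, 27), (4, 27), (12, 27), (11, 27), (36, 36), (37, 36), (39, 36), (35, 36), (43, 36), (59, 36), (51, 36), (52, 36), (45, 45), (44, 45), (46, 45), (42, 45), (34, 45), (50, 45), (58, 45), (61, 45), (54, 54), (55, 54), (53, 54), (49, 54), (57, 54), (41, 54), (33, 54), (38, 54), (63, 63), (62, 63), (60, 63), (56, 63), (48, 63), (32, 63), (40, 63), (47, 63)] := by decide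

-- first-match miss on an association list none of whose keys equals x
theorem pv_getD_miss (L : List (Int × Int)) (x d : Int) (h : ∀ p ∈ L, p.1 ≠ x) :
    (PySem.Dict.mk L).getD x d = d := by
  induction L with
  | nil => rfl
  | cons p rest ih =>
    have hne : (p.1 == x) = false := by simpa using h p (by simp)
    show (Option.map (fun q => q.2) (List.find? (fun q => q.1 == x) (p :: rest))).getD d = d
    have hstep : List.find? (fun q => q.1 == x) (p :: rest) = List.find? (fun q => q.1 == x) rest := by
      simp [hne]
    rw [hstep]
    exact ih fun q hq => h q (by simp [hq])

-- every key of the literal table lies in [0, 64)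
set_option maxRecDepth 4000 in
lemma pv_keys_bounded : ∀ p ∈ ([(0, 0), (1, 0), (3, 0), (7, 0), (15, 0), (31, 0), (23, 0), (16, 0), (9, 9), (8, 9), (10, 9), (14, 9), (6, 9), (22, 9), (30, 9), (25, 9), (18, 18), (19, 18), (17, 18), (21, 18), (29, 18), (13, 18), (5, 18), (2, 18), (27, 27), (26, 27), (24, 27), (28, 27), (20, 27), (4, 27), (12, 27), (11, 27), (36, 36), (37, 36), (39, 36), (35, 36), (43, 36), (59, 36), (51, 36), (52, 36), (45, 45), (44, 45), (46, 45), (42, 45), (34, 45), (50, 45), (58, 45), (61, 45), (54, 54), (55, 54), (53, 54), (49, 54), (57, 54), (41, 54), (33, 54), (38, 54), (63, 63), (62, 63), (60, 63), (56, 63), (48, 63), (32, 63), (40, 63), (47, 63)] : List (Int × Int)),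
    0 ≤ p.1 ∧ p.1 < 64 := by decide

-- outside [0, 64) A's scan finds nothing and B's lookup misses: both fall back to hex_val
lemma pv_out_of_range (hex_val : Int) (h : hex_val < 0 ∨ 64 ≤ hex_val) :
    palace_root_py hex_val = hex_val ∧ palace_root_py_alt hex_val = hex_val := by
  constructor
  · unfold palace_root_py
    rw [pvAOuter_eq_none]
    · rfl
    · intro t ht
      unfold pvAStep
      apply pvAInner_eq_none
      intro m hm
      have := pv_candidates_bounded t ht m hm
      omega
  · unfold palace_root_py_alt
    rw [pvTable_lit]
    apply pv_getD_miss
    intro p hp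
    have := pv_keys_bounded p hp
    omega

-- ===== VERDICT (by name: the statement is the Claim_ definition above) =====
set_option maxRecDepth 20000 in
theorem palace_root_py_spec : Claim_equal_palace_root_py := by
  intro hex_val _
  unfold Spec_palace_root_py
  by_cases h : 0 ≤ hex_val ∧ hex_val < 64
  · obtain ⟨h0, h1⟩ := h
    interval_cases hex_val <;> decide
  · obtain ⟨ha, hb⟩ := pv_out_of_range hex_val (by omega)
    rw [ha, hb]
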